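-- pv_equiv track=rewrite | github.com/spio29/My-Agent | app/jobs/handlers/agent_workflow.py | _pilih_akun
-- ===== SOURCE A (Python) =====
-- from typing import Any, Dict, List, Optional
--
-- def _pilih_akun(
--     grouped: Dict[str, List[Dict[str, Any]]],
--     provider: str,
--     account_id: str,
-- ) -> Optional[Dict[str, Any]]:
--     rows = grouped.get(provider, [])
--     if not rows:
--         return None
--
--     for row in rows:
--         if str(row.get("account_id") or "") == account_id:
--             return row
--
--     for row in rows:
--         if str(row.get("account_id") or "") == "default":
--             return row
--
--     return rows[0]
-- ===== SOURCE B (Python) =====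
-- def _pilih_akun(grouped, provider, account_id):
--     rows = grouped.get(provider, [])
--     if not rows:
--         return None
--     default_row = None
--     for row in rows:
--         key = str(row.get("account_id") or "")
--         if key == account_id:
--             return row
--         if default_row is None and key == "default":
--             default_row = row
--     return default_row if default_row is not None else rows[0]
-- ===== Notes on version B (the rewrite author's own statement) =====
-- stated objective: simpler
-- what changed: Replaces A's two sequential scans (exact match, then default) with a single pass that returns on an exact match and remembers the first 'default' row as a fallback candidate.
import Mathlib
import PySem

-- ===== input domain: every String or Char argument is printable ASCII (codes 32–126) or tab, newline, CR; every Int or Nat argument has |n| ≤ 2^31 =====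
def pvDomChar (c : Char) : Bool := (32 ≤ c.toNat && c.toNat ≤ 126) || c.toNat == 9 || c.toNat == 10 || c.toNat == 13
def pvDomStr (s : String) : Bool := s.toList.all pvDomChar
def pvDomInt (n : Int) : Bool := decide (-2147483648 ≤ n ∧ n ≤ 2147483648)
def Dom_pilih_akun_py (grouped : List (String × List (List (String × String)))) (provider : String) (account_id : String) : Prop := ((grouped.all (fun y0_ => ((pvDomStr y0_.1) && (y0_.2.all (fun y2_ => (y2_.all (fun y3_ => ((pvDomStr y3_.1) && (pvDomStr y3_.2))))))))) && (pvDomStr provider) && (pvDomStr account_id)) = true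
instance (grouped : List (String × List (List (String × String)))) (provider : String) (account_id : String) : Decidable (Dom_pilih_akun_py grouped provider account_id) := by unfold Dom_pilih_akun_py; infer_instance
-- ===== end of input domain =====

-- B replaces A's two sequential scans with one pass that remembers the first "default" row; objective: simpler.
-- ===== PORT A =====
-- key of a row: str(row.get("account_id") or "") — first-match dict lookup, missing/empty → ""
def pvRowKey (row : List (String × String)) : String :=
  PySem.Dict.getD (PySem.Dict.mk row) "account_id" ""

-- Port of A: two sequential for-loops with early return (= first match) then rows[0]
def pilih_akun_py (grouped : List (String × List (List (String × String)))) (provider : String) (account_id : String) : Option (List (String × String)) :=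
  let rows := PySem.Dict.getD (PySem.Dict.mk grouped) provider []
  if rows = [] then none
  else
    match rows.find? (fun row => pvRowKey row == account_id) with
    | some row => some row
    | none =>
      match rows.find? (fun row => pvRowKey row == "default") with
      | some row => some row
      | none => PySem.List.pyGet? rows 0

-- ===== PORT B =====
-- B's single loop: return row on exact match, else remember the first "default" row
def pvAltLoop (account_id : String) (rows : List (List (String × String))) (default_row : Option (List (String × String))) : Option (List (String × String)) :=
  match rows with
  | [] => default_row
  | row :: rest =>
    let key := pvRowKey row
    if key == account_id then some row
    else pvAltLoop account_id rest
      (if default_row.isNone && (key == "default") then some row else default_row)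

-- Port of B: one pass maintaining a default candidate, then candidate-or-rows[0]
def pilih_akun_py_alt (grouped : List (String × List (List (String × String)))) (provider : String) (account_id : String) : Option (List (String × String)) :=
  let rows := PySem.Dict.getD (PySem.Dict.mk grouped) provider []
  if rows = [] then none
  else
    match pvAltLoop account_id rows none with
    | some row => some row
    | none => PySem.List.pyGet? rows 0

-- ===== PRECONDITION & SPEC =====
def Spec_pilih_akun_py (grouped : List (String × List (List (String × String)))) (provider : String) (account_id : String) (out : Option (List (String × String))) : Prop := out = pilih_akun_py_alt grouped provider account_id
instance (grouped : List (String × List (List (String × String)))) (provider : String) (account_id : String) (out : Option (List (String × String))) : Decidable (Spec_pilih_akun_py grouped provider account_id out) := by unfold Spec_pilih_akun_py; infer_instance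

-- ===== CLAIM (what is proved, stated in full; the proofs are below) =====
def Claim_equal_pilih_akun_py : Prop := ∀ (grouped : List (String × List (List (String × String)))) (provider : String) (account_id : String), Dom_pilih_akun_py grouped provider account_id → Spec_pilih_akun_py grouped provider account_id (pilih_akun_py grouped provider account_id)

-- ===== LEMMAS AND PROOFS =====

-- ===== VERDICT (by name: the statement is the Claim_ definition above) =====
lemma pvAltLoop_eq (account_id : String) (rows : List (List (String × String))) (default_row : Option (List (String × String))) :
    pvAltLoop account_id rows default_row =
      ((rows.find? (fun row => pvRowKey row == account_id)).or
        (default_row.or (rows.find? (fun row => pvRowKey row == "default")))) := by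
  induction rows generalizing default_row with
  | nil => simp [pvAltLoop]
  | cons row rest ih =>
    simp only [pvAltLoop, List.find?]
    by_cases h1 : pvRowKey row == account_id
    · simp [h1]
    · simp only [h1, if_false, Bool.false_eq_true, ih]
      by_cases h2 : pvRowKey row == "default"
      · cases default_row <;> simp [h2, Option.or]
      · cases default_row <;> simp [h2, Option.or]

theorem pilih_akun_py_spec : Claim_equal_pilih_akun_py := by
  intro grouped provider account_id _
  unfold Spec_pilih_akun_py pilih_akun_py pilih_akun_py_alt
  simp only [pvAltLoop_eq, Option.none_or]
  cases h : PySem.Dict.getD (PySem.Dict.mk grouped) provider [] with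
  | nil => simp
  | cons r rs =>
    cases (r :: rs).find? (fun row => pvRowKey row == account_id) <;>
      cases (r :: rs).find? (fun row => pvRowKey row == "default") <;>
        simp [Option.or]
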